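-- pv_equiv track=rewrite | github.com/timothyroch/HackerRank | AI/Natural Language Processing/trigram.py | most_frequent_trigram
-- ===== SOURCE A (Python) =====
-- def most_frequent_trigram(text: str) -> str:
--     text = text.lower()
--     counts = {}
--     best_count = 0
--     best_trigram = ""
--
--     # Split sentences on '.' and extract trigrams within each
--     for sent in text.split('.'):
--         words = sent.split()
--         for i in range(len(words) - 2):
--             tri = ' '.join(words[i:i+3])
--             counts[tri] = counts.get(tri, 0) + 1
--             # Update best trigram if higher count, or same count but seen earlier
--             if counts[tri] > best_count:
--                 best_count = counts[tri]
--                 best_trigram = tri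
--
--     return best_trigram
-- ===== SOURCE B (Python) =====
-- def _trigrams(text):
--     # flat list of all trigrams, in order of appearance
--     return [' '.join(w[i:i + 3])
--             for sent in text.lower().split('.')
--             for w in [sent.split()]
--             for i in range(len(w) - 2)]
--
--
-- def most_frequent_trigram(text: str) -> str:
--     trigrams = _trigrams(text)
--     if not trigrams:
--         return ""
--     # total counts, and the maximum count m
--     counts = {}
--     for t in trigrams:
--         counts[t] = counts.get(t, 0) + 1
--     m = max(counts.values())
--     # the answer is the first trigram whose running count reaches m
--     running = {}
--     for t in trigrams:
--         c = running.get(t, 0) + 1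
--         if c == m:
--             return t
--         running[t] = c
--     return ""  # unreachable: some trigram reaches count m
-- ===== Notes on version B (the rewrite author's own statement) =====
-- stated objective: alternative
-- what changed: A's single fused pass (count dict + running best tracked together) is replaced by three separate passes: build the flat trigram list, total it into a counts table and take the maximum count m, then rescan the list returning the first trigram whose running count reaches m.
import Mathlib
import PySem

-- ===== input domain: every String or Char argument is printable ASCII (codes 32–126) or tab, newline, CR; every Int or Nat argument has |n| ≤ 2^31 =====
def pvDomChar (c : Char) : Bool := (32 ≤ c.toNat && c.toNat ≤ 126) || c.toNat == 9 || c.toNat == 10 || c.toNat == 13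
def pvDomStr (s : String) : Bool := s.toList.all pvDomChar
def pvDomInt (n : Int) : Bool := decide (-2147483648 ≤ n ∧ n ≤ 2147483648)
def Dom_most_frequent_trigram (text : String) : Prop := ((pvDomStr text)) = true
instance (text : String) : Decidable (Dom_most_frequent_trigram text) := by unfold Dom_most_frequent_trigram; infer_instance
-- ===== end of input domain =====

-- B replaces A's fused count-and-track pass by three passes (flat trigram list; total counts and
-- their maximum m; rescan for the first trigram whose running count reaches m); objective:
-- alternative decomposition, same cost.

-- ===== PORT A =====
def most_frequent_trigram (text : String) : String :=
  let text := PySem.Str.lower text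
  let st :=
    ((PySem.Str.split? text ".").getD []).foldl
      (fun (st : PySem.Dict String Int × Int × String) sent =>
        let words := PySem.Str.split₀ sent
        (PySem.List.pyRange 0 ((words.length : Int) - 2) 1).foldl
          (fun st i =>
            let tri := PySem.Str.join " " (PySem.List.slice words (some i) (some (i + 3)))
            let c := st.1.getD tri 0 + 1
            let counts := st.1.insert tri c
            if c > st.2.1 then (counts, c, tri) else (counts, st.2.1, st.2.2))
          st)
      (PySem.Dict.empty, 0, "")
  st.2.2

-- ===== PORT B =====
-- Source B's helper _trigrams: the flat list of all trigrams, in order of appearance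
def pvTriOf (sent : String) : List String :=
  let w := PySem.Str.split₀ sent
  (PySem.List.pyRange 0 ((w.length : Int) - 2) 1).map
    (fun i => PySem.Str.join " " (PySem.List.slice w (some i) (some (i + 3))))

def pvTrigramsB (text : String) : List String :=
  ((PySem.Str.split? (PySem.Str.lower text) ".").getD []).flatMap pvTriOf

-- Source B's third pass: first trigram whose running count becomes m ("" is the unreachable fall-through)
def pvScanB (m : Int) (running : PySem.Dict String Int) : List String → String
  | [] => ""
  | t :: rest =>
      let c := running.getD t 0 + 1
      if c = m then t else pvScanB m (running.insert t c) rest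

def most_frequent_trigram_alt (text : String) : String :=
  let trigrams := pvTrigramsB text
  if trigrams = [] then ""
  else
    let counts := trigrams.foldl (fun (d : PySem.Dict String Int) t => d.insert t (d.getD t 0 + 1)) PySem.Dict.empty
    let m := (PySem.List.max? counts.values (fun x => x)).getD 0
    pvScanB m PySem.Dict.empty trigrams

-- ===== PRECONDITION & SPEC =====
def Spec_most_frequent_trigram (text : String) (out : String) : Prop := out = most_frequent_trigram_alt text
instance (text : String) (out : String) : Decidable (Spec_most_frequent_trigram text out) := by unfold Spec_most_frequent_trigram; infer_instance

-- ===== CLAIM (what is proved, stated in full; the proofs are below) =====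
def Claim_equal_most_frequent_trigram : Prop := ∀ (text : String), Dom_most_frequent_trigram text → Spec_most_frequent_trigram text (most_frequent_trigram text)

-- ===== LEMMAS AND PROOFS =====

-- A's fused step over one trigram
def pvStepA (st : PySem.Dict String Int × Int × String) (t : String) :
    PySem.Dict String Int × Int × String :=
  let c := st.1.getD t 0 + 1
  let counts := st.1.insert t c
  if c > st.2.1 then (counts, c, t) else (counts, st.2.1, st.2.2)

-- the running maximum count A's best_count maintains
def pvBcAfter (d : PySem.Dict String Int) (bc : Int) : List String → Int
  | [] => bc
  | t :: rest =>
      let c := d.getD t 0 + 1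
      pvBcAfter (d.insert t c) (max bc c) rest

theorem pvGetD_empty (x : String) : (PySem.Dict.empty : PySem.Dict String Int).getD x 0 = 0 := rfl

-- counting casts, in the one shape omega wants
theorem pvCount_cons (u t : String) (l : List String) :
    (((t :: l).count u : Int)) = ((l.count u : Int)) + (if u = t then 1 else 0) := by
  by_cases h : u = t
  · subst h; simp [List.count_cons_self]
  · simp [h, Ne.symm h]

theorem pvBcAfter_mono (ts : List String) :
    ∀ (d : PySem.Dict String Int) (bc : Int), bc ≤ pvBcAfter d bc ts := by
  induction ts with
  | nil => intro d bc; simp [pvBcAfter]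
  | cons t rest ih =>
      intro d bc
      simp only [pvBcAfter]
      exact le_trans (le_max_left _ _) (ih _ _)

theorem pvFoldA_bt_frozen (ts : List String) :
    ∀ (d : PySem.Dict String Int) (bc : Int) (bt : String),
      pvBcAfter d bc ts = bc → (ts.foldl pvStepA (d, bc, bt)).2.2 = bt := by
  induction ts with
  | nil => intro d bc bt _; rfl
  | cons t rest ih =>
      intro d bc bt h
      simp only [pvBcAfter] at h
      have hle : max bc (d.getD t 0 + 1) ≤ bc := by
        have := pvBcAfter_mono rest (d.insert t (d.getD t 0 + 1)) (max bc (d.getD t 0 + 1))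
        omega
      have hc : ¬ (d.getD t 0 + 1 > bc) := by
        have := le_max_right bc (d.getD t 0 + 1); omega
      simp only [List.foldl_cons, pvStepA, if_neg hc]
      apply ih
      have hmax : max bc (d.getD t 0 + 1) = bc := by omega
      rw [hmax] at h; exact h

-- core: starting below M, A's tracked best trigram is the first whose running count reaches M
theorem pvMain (ts : List String) :
    ∀ (d : PySem.Dict String Int) (bc : Int) (bt : String) (M : Int),
      bc < M → pvBcAfter d bc ts = M →
      (ts.foldl pvStepA (d, bc, bt)).2.2 = pvScanB M d ts := by
  induction ts with
  | nil =>
      intro d bc bt M hlt h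
      simp [pvBcAfter] at h; omega
  | cons t rest ih =>
      intro d bc bt M hlt h
      simp only [pvBcAfter] at h
      have hcle : d.getD t 0 + 1 ≤ M := by
        have := pvBcAfter_mono rest (d.insert t (d.getD t 0 + 1)) (max bc (d.getD t 0 + 1))
        have := le_max_right bc (d.getD t 0 + 1)
        omega
      simp only [List.foldl_cons, pvStepA, pvScanB]
      by_cases hM : d.getD t 0 + 1 = M
      · -- reached M: A updates best to t and never improves again; B returns t
        have hgt : d.getD t 0 + 1 > bc := by omega
        simp only [if_pos hgt, if_pos hM]
        apply pvFoldA_bt_frozen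
        rw [hM] at h ⊢
        have hmax : max bc M = M := by omega
        rw [hmax] at h; exact h
      · -- still below M on both sides
        have hclt : d.getD t 0 + 1 < M := by omega
        simp only [if_neg hM]
        by_cases hgt : d.getD t 0 + 1 > bc
        · simp only [if_pos hgt]
          have hmax : max bc (d.getD t 0 + 1) = d.getD t 0 + 1 := by omega
          rw [hmax] at h
          exact ih _ _ _ _ hclt h
        · simp only [if_neg hgt]
          have hmax : max bc (d.getD t 0 + 1) = bc := by omega
          rw [hmax] at h
          exact ih _ _ _ _ hlt h

-- upper bound: the running maximum never exceeds a bound on the final totals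
theorem pvBcAfter_le (ts : List String) :
    ∀ (d : PySem.Dict String Int) (bc M : Int),
      (∀ t ∈ ts, d.getD t 0 + (ts.count t : Int) ≤ M) → bc ≤ M →
      pvBcAfter d bc ts ≤ M := by
  induction ts with
  | nil => intro d bc M _ h; simpa [pvBcAfter] using h
  | cons t rest ih =>
      intro d bc M hall hbc
      simp only [pvBcAfter]
      have hhead := hall t (by simp)
      rw [pvCount_cons, if_pos rfl] at hhead
      apply ih
      · intro u hu
        have hu' := hall u (List.mem_cons_of_mem _ hu)
        rw [pvCount_cons] at hu'
        rw [PySem.Dict.getD_insert]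
        by_cases he : u = t
        · subst he
          rw [if_pos rfl] at hu' ⊢
          omega
        · rw [if_neg he] at hu' ⊢
          omega
      · have h0 : (0 : Int) ≤ (rest.count t : Int) := Int.natCast_nonneg _
        omega
  -- max bc c ≤ M since c ≤ M and bc ≤ M

-- lower bound: every total count is reached by the running maximum (at its last occurrence)
theorem pvBcAfter_ge (ts : List String) :
    ∀ (d : PySem.Dict String Int) (bc : Int) (t : String), t ∈ ts →
      d.getD t 0 + (ts.count t : Int) ≤ pvBcAfter d bc ts := by
  induction ts with
  | nil => intro _ _ _ h; cases h
  | cons t' rest ih =>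
      intro d bc t hmem
      simp only [pvBcAfter]
      rw [pvCount_cons]
      by_cases hr : t ∈ rest
      · have := ih (d.insert t' (d.getD t' 0 + 1)) (max bc (d.getD t' 0 + 1)) t hr
        rw [PySem.Dict.getD_insert] at this
        by_cases he : t = t'
        · subst he
          rw [if_pos rfl] at this ⊢
          omega
        · rw [if_neg he] at this ⊢; omega
      · have he : t = t' := by
          rcases List.mem_cons.mp hmem with h | h
          · exact h
          · exact absurd h hr
        subst he
        rw [if_pos rfl]
        have hc : (rest.count t : Int) = 0 := by
          rw [List.count_eq_zero.mpr hr]; rfl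
        have hmono := pvBcAfter_mono rest (d.insert t (d.getD t 0 + 1)) (max bc (d.getD t 0 + 1))
        have := le_max_right bc (d.getD t 0 + 1)
        omega

-- B's m (the max of the counter's values) equals A's final best_count, for a nonempty trigram list
theorem pvM_eq (ts : List String) (hne : ts ≠ []) :
    (PySem.List.max? (PySem.Dict.counter ts).values (fun x => x)).getD 0 = pvBcAfter PySem.Dict.empty 0 ts := by
  have hvals : (PySem.Dict.counter ts).values =
      (PySem.Set.ofList ts).map (fun k => ((ts.count k : Int))) := by
    rw [PySem.Dict.values_eq_map_keys _ (PySem.Dict.nodup_keys_counter ts) 0,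
        PySem.Dict.keys_counter]
    exact List.map_congr_left (fun k _ => PySem.Dict.getD_counter ts k)
  obtain ⟨t0, ts', hts⟩ : ∃ t0 ts', PySem.Set.ofList ts = t0 :: ts' := by
    cases hS : PySem.Set.ofList ts with
    | nil =>
        exfalso
        obtain ⟨x, xs, rfl⟩ := List.exists_cons_of_ne_nil hne
        have := (PySem.Set.mem_ofList (x :: xs) x).mpr (by simp)
        rw [hS] at this; cases this
    | cons a l => exact ⟨a, l, rfl⟩
  rw [hvals, hts, List.map_cons, PySem.List.max?_id_cons, Option.getD_some]
  set v0 : Int := (ts.count t0 : Int) with hv0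
  set vs : List Int := ts'.map (fun k => ((ts.count k : Int))) with hvs
  have hub : ∀ t ∈ ts, (ts.count t : Int) ≤ List.foldl max v0 vs := by
    intro t ht
    have hmem : t ∈ PySem.Set.ofList ts := (PySem.Set.mem_ofList ts t).mpr ht
    rw [hts] at hmem
    rcases List.mem_cons.mp hmem with h | h
    · rw [h, ← hv0]; exact (PySem.List.le_foldl_max vs v0).1
    · exact (PySem.List.le_foldl_max vs v0).2 _ (List.mem_map.mpr ⟨t, h, rfl⟩)
  apply le_antisymm
  · -- the max of the values is one of the totals, and each total is reached
    rcases PySem.List.foldl_max_mem vs v0 with h | h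
    · rw [h, hv0]
      have ht0 : t0 ∈ ts := (PySem.Set.mem_ofList ts t0).mp (by rw [hts]; simp)
      have hge := pvBcAfter_ge ts PySem.Dict.empty 0 t0 ht0
      rw [pvGetD_empty] at hge; omega
    · obtain ⟨k, hk, hv⟩ := List.mem_map.mp (hvs ▸ h)
      rw [← hv]
      have hkts : k ∈ ts := (PySem.Set.mem_ofList ts k).mp (by rw [hts]; simp [hk])
      have hge := pvBcAfter_ge ts PySem.Dict.empty 0 k hkts
      rw [pvGetD_empty] at hge; omega
  · -- the running maximum never exceeds the max of the totals
    apply pvBcAfter_le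
    · intro t ht
      have := hub t ht
      rw [pvGetD_empty]; omega
    · obtain ⟨x, xs, rfl⟩ := List.exists_cons_of_ne_nil hne
      have hx := hub x (by simp)
      have h1 : (1 : Int) ≤ ((x :: xs).count x : Int) := by
        rw [pvCount_cons, if_pos rfl]
        have : (0 : Int) ≤ (xs.count x : Int) := Int.natCast_nonneg _
        omega
      omega

-- A's per-sentence loop body, named so the flattening lemmas can mention it
def pvOuterA (st : PySem.Dict String Int × Int × String) (sent : String) :
    PySem.Dict String Int × Int × String :=
  let words := PySem.Str.split₀ sent
  (PySem.List.pyRange 0 ((words.length : Int) - 2) 1).foldl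
    (fun st i =>
      let tri := PySem.Str.join " " (PySem.List.slice words (some i) (some (i + 3)))
      let c := st.1.getD tri 0 + 1
      let counts := st.1.insert tri c
      if c > st.2.1 then (counts, c, tri) else (counts, st.2.1, st.2.2)) st

theorem pvOuterA_eq (st : PySem.Dict String Int × Int × String) (sent : String) :
    pvOuterA st sent = (pvTriOf sent).foldl pvStepA st := by
  unfold pvOuterA pvTriOf
  rw [List.foldl_map]
  rfl

theorem pvA_outer (sents : List String) :
    ∀ st, sents.foldl pvOuterA st = (sents.flatMap pvTriOf).foldl pvStepA st := by
  induction sents with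
  | nil => intro st; rfl
  | cons sent rest ih =>
      intro st
      rw [List.foldl_cons, List.flatMap_cons, List.foldl_append, ← ih, pvOuterA_eq]

-- A's nested loops are the pvStepA fold over the flat trigram list
theorem pvA_eq_fold (text : String) :
    most_frequent_trigram text =
      ((pvTrigramsB text).foldl pvStepA (PySem.Dict.empty, 0, "")).2.2 := by
  have h := pvA_outer ((PySem.Str.split? (PySem.Str.lower text) ".").getD []) (PySem.Dict.empty, 0, "")
  unfold most_frequent_trigram pvTrigramsB
  show (List.foldl pvOuterA (PySem.Dict.empty, 0, "")
      ((PySem.Str.split? (PySem.Str.lower text) ".").getD [])).2.2 = _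
  rw [h]

-- ===== VERDICT (by name: the statement is the Claim_ definition above) =====
theorem most_frequent_trigram_spec : Claim_equal_most_frequent_trigram := by
  intro text _
  unfold Spec_most_frequent_trigram
  rw [pvA_eq_fold]
  unfold most_frequent_trigram_alt
  by_cases hne : pvTrigramsB text = []
  · rw [if_pos hne, hne]; rfl
  · rw [if_neg hne]
    show _ = pvScanB _ PySem.Dict.empty (pvTrigramsB text)
    rw [PySem.Dict.foldl_insert_getD_add_one_eq_counter, pvM_eq _ hne]
    apply pvMain
    · -- the running maximum is positive on a nonempty list
      obtain ⟨x, xs, hx⟩ := List.exists_cons_of_ne_nil hne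
      rw [hx]
      simp only [pvBcAfter]
      have hmono := pvBcAfter_mono xs
        ((PySem.Dict.empty : PySem.Dict String Int).insert x
          ((PySem.Dict.empty : PySem.Dict String Int).getD x 0 + 1))
        (max 0 ((PySem.Dict.empty : PySem.Dict String Int).getD x 0 + 1))
      rw [pvGetD_empty] at hmono ⊢
      omega
    · rfl
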